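-- pv_equiv track=rewrite | github.com/xuwiliam/Adgame | count.py | count_max
-- ===== SOURCE A (Python) =====
-- def count_max(data):
--     t = 0
--     s = set()
--     for d in data:
--         xs = d.split(' ')
--         for x in xs:
--             s.add(x)
--     return len(s)
-- ===== SOURCE B (Python) =====
-- def count_max(data):
--     # sort-then-scan distinct count instead of a hash set
--     toks = []
--     for d in data:
--         toks += d.split(' ')
--     toks.sort()
--     c = 0
--     first = True
--     prev = None
--     for x in toks:
--         if first or x != prev:
--             c += 1
--         first = False
--         prev = x
--     return c
-- ===== Notes on version B (the rewrite author's own statement) =====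
-- stated objective: alternative
-- what changed: Replaces the hash-set insertion loop with flattening all tokens into one list, sorting it, and counting boundaries between unequal neighbours in a single scan.
import Mathlib
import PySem

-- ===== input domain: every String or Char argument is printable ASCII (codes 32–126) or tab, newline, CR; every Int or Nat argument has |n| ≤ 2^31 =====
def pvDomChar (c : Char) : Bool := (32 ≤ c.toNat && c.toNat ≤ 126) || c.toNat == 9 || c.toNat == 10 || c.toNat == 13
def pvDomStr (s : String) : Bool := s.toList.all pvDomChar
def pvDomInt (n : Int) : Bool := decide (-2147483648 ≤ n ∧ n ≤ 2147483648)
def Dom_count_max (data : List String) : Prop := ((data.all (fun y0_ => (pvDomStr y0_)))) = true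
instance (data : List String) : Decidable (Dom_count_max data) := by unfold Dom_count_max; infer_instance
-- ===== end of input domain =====

-- B replaces A's hash-set insertion with flatten + sort + one scan counting unequal neighbours.

-- d.split(' '): sep nonempty so split? is always some
def pvSplit (d : String) : List String := (PySem.Str.split? d " ").getD []

-- ===== PORT A =====
def count_max (data : List String) : Int :=
  let s : PySem.Set String :=
    data.foldl (fun s d =>
      (pvSplit d).foldl (fun s x => PySem.Set.add s x) s) PySem.Set.empty
  PySem.Set.len s

-- ===== PORT B =====
-- scan with 'prev': +1 whenever the current element differs from the previous one
def pvCountRun (prev : String) : List String → Int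
  | [] => 0
  | x :: rest => (if x ≠ prev then 1 else 0) + pvCountRun x rest

def count_max_alt (data : List String) : Int :=
  let toks := data.foldl (fun acc d => acc ++ pvSplit d) []
  let ts := PySem.List.sorted toks (fun x => x) false
  match ts with
  | [] => 0
  | h :: t => 1 + pvCountRun h t

-- ===== PRECONDITION & SPEC =====
def Spec_count_max (data : List String) (out : Int) : Prop := out = count_max_alt data
instance (data : List String) (out : Int) : Decidable (Spec_count_max data out) := by unfold Spec_count_max; infer_instance

-- ===== CLAIM (what is proved, stated in full; the proofs are below) =====
def Claim_equal_count_max : Prop := ∀ (data : List String), Dom_count_max data → Spec_count_max data (count_max data)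

-- ===== LEMMAS AND PROOFS =====

-- A's nested fold over the split lists is the fold over the flattened token list
lemma fold_add_flat (data : List String) (s : PySem.Set String) :
    data.foldl (fun s d => (pvSplit d).foldl (fun s x => PySem.Set.add s x) s) s
      = (data.flatMap (fun d => pvSplit d)).foldl (fun s x => PySem.Set.add s x) s := by
  induction data generalizing s with
  | nil => rfl
  | cons d rest ih => simp [List.flatMap_cons, List.foldl_append, ih]

-- a nodup list's length is its toFinset card, by membership
lemma len_eq_card_of_nodup (l : List String) (h : l.Nodup) : (l.length : Int) = l.toFinset.card := by
  rw [List.toFinset_card_of_nodup h]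

-- the scan counts the distinct elements of a ≤-sorted list
lemma countRun_sorted (h : String) (t : List String)
    (hp : (h :: t).Pairwise (fun a b => a ≤ b)) :
    1 + pvCountRun h t = ((h :: t).toFinset.card : Int) := by
  induction t generalizing h with
  | nil => simp [pvCountRun]
  | cons x rest ih =>
    have hp' : (x :: rest).Pairwise (fun a b => a ≤ b) := hp.of_cons
    rcases List.pairwise_cons.mp hp with ⟨hhead, _⟩
    by_cases hx : x = h
    · subst hx
      have : (x :: x :: rest).toFinset = (x :: rest).toFinset := by
        simp [List.toFinset_cons]
      rw [this, ← ih x hp']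
      simp [pvCountRun]
    · have hnotmem : h ∉ (x :: rest).toFinset := by
        simp only [List.mem_toFinset, List.mem_cons]
        rintro (rfl | hmem)
        · exact hx rfl
        · -- h ∈ rest : then x ≤ h (sorted) and h ≤ x (head), so x = h
          rcases List.pairwise_cons.mp hp' with ⟨hx2, _⟩
          exact hx (le_antisymm (hx2 h hmem) (hhead x (List.mem_cons_self)))
      have hcard : ((h :: x :: rest).toFinset.card : Int) = 1 + (x :: rest).toFinset.card := by
        rw [List.toFinset_cons, Finset.card_insert_of_notMem hnotmem]
        push_cast; ring
      rw [hcard, ← ih x hp']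
      simp [pvCountRun, hx]

lemma toFinset_eq_of_mem_iff (l l' : List String) (h : ∀ x, x ∈ l ↔ x ∈ l') :
    l.toFinset = l'.toFinset := by
  ext x; simp [List.mem_toFinset, h]

-- ===== VERDICT (by name: the statement is the Claim_ definition above) =====
theorem count_max_spec : Claim_equal_count_max := by
  intro data _
  unfold Spec_count_max count_max count_max_alt
  simp only []
  set L := data.flatMap (fun d => pvSplit d) with hL
  have hBflat : data.foldl (fun acc d => acc ++ pvSplit d) [] = L := by
    rw [PySem.List.foldl_append_eq_flatMap]; simp [hL]
  have hAflat := fold_add_flat data PySem.Set.empty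
  have hAset : data.foldl (fun s d => (pvSplit d).foldl (fun s x => PySem.Set.add s x) s) PySem.Set.empty = PySem.Set.ofList L := by
    rw [hAflat, PySem.Set.ofList_eq_foldl]
    rfl
  rw [hAset, hBflat]
  -- LHS: length of the dedup; RHS: scan over sorted L
  have hlenA : (PySem.Set.len (PySem.Set.ofList L) : Int) = (L.toFinset.card : Int) := by
    have h1 := len_eq_card_of_nodup (PySem.Set.ofList L) (PySem.Set.nodup_ofList L)
    have h2 : (PySem.Set.ofList L).toFinset = L.toFinset :=
      toFinset_eq_of_mem_iff _ _ (fun x => by simp [PySem.Set.mem_ofList])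
    simpa [PySem.Set.len, h2] using h1
  rw [hlenA]
  cases hs : PySem.List.sorted L (fun x => x) false with
  | nil =>
    have : L = [] := (PySem.List.sorted_eq_nil_iff _ _ _).mp hs
    simp [this]
  | cons h t =>
    have hperm : (h :: t).Perm L := hs ▸ PySem.List.sorted_perm L (fun x => x) false
    have hpw : (h :: t).Pairwise (fun a b => a ≤ b) := by
      have := PySem.List.sorted_pairwise L (fun x => x)
      rw [hs] at this; exact this
    have := countRun_sorted h t hpw
    rw [toFinset_eq_of_mem_iff (h :: t) L (fun x => hperm.mem_iff)] at this
    simpa using this.symm
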